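-- pv_equiv track=rewrite | github.com/sumakola/sumacp | 03-recursion_onlyevendigits-Python/recursion_onlyevendigits.py | fun_recursion_onlyevendigits
-- ===== SOURCE A (Python) =====
-- def fun_recursion_onlyevendigits(l, finl=None, count=0):
--     if finl == None:
--         finl = []
--     if l == [] and count == 0:
--         return l
--     if len(l) == 0:
--         return finl
--     else:
--         count += 1
--         # we will call our helper fuction on every number to convert them into
--         # numbers made of only even numbers
--         newNum = checkForEvens(l[0])
--         finl.append(newNum)
--         return fun_recursion_onlyevendigits(l[1:], finl, count)
--
-- def checkForEvens(number, newNum=0, powers=1):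
--     # base case checks if we have already loooped through the whole number
--     digit = number % 10
--     if number <= 0:
--         return newNum
--     else:
--         # first we get the number from the very left
--         if digit % 2 == 0:
--             # add the firstDigit to our newNum
--             newNum += digit * powers
--             number //= 10
--             # strip down the number by 10
--             powers *= 10
--             return checkForEvens(number, newNum, powers)
--         else:
--             number //= 10
--             return checkForEvens(number, newNum, powers)
-- ===== SOURCE B (Python) =====
-- # Iterative rewrite (no recursion, no slice copies): for-loop over the list, while-loop packing even digits.
-- # Note: appends to a caller-supplied finl in place, like A.
-- def fun_recursion_onlyevendigits(l, finl=None, count=0):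
--     if finl is None:
--         finl = []
--     if l == [] and count == 0:
--         return l
--     for n in l:
--         newNum = 0
--         powers = 1
--         while n > 0:
--             d = n % 10
--             if d % 2 == 0:
--                 newNum += d * powers
--                 powers *= 10
--             n //= 10
--         finl.append(newNum)
--     return finl
-- ===== Notes on version B (the rewrite author's own statement) =====
-- stated objective: faster
-- what changed: Replaces both recursions (the outer list recursion that copies l[1:] at every step, and the inner digit recursion) by two plain loops: a for-loop over the list and a while-loop that packs even digits.
-- intended difference: On calls with a nonempty l and count = -len(l), A's incremented counter reaches zero exactly when the list is exhausted, so its empty-input guard re-fires and A discards everything and returns an empty list; B returns finl plus the processed numbers, which is what the function is for. — e.g. on fun_recursion_onlyevendigits([2], none, -1): A returns [], B returns [2]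
import Mathlib
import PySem

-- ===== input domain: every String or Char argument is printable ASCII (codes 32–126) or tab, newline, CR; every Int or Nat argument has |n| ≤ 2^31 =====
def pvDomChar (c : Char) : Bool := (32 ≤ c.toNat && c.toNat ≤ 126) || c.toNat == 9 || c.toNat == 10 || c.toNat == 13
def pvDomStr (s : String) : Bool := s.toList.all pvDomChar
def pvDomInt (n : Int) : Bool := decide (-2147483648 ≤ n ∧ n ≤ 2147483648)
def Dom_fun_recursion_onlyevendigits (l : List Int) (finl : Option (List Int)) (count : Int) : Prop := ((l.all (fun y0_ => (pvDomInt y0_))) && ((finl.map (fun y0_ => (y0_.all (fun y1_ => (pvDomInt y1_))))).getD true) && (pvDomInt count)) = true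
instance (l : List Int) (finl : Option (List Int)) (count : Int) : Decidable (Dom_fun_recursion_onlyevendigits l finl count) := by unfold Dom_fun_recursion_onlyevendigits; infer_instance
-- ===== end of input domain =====

-- ===== PORT A =====
-- B appends to a caller-supplied finl in place exactly as A does; the equivalence proved here is about the return value.
def checkForEvens (number newNum powers : Int) : Int :=
  -- digit = number % 10, computed before the guard in A; inlined here (pure)
  if number ≤ 0 then newNum
  else
    if PySem.Int.mod (PySem.Int.mod number 10) 2 = 0 then
      checkForEvens (PySem.Int.floordiv number 10) (newNum + (PySem.Int.mod number 10) * powers) (powers * 10)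
    else
      checkForEvens (PySem.Int.floordiv number 10) newNum powers
termination_by number.toNat
decreasing_by
  all_goals
    have h : PySem.Int.floordiv number 10 = number / 10 :=
      PySem.Int.floordiv_eq_ediv_of_pos (by omega)
    simp only [h]; omega

def funAux (l : List Int) (finl : List Int) (count : Int) : List Int :=
  if l = [] ∧ count = 0 then l
  else match l with
  | [] => finl
  | x :: rest => funAux rest (finl ++ [checkForEvens x 0 1]) (count + 1)

def fun_recursion_onlyevendigits (l : List Int) (finl : Option (List Int)) (count : Int) : List Int :=
  funAux l (finl.getD []) count

-- ===== PORT B =====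
def evensLoop (n newNum powers : Int) : Int :=
  -- d = n % 10 (pure, inlined)
  if 0 < n then
    if PySem.Int.mod (PySem.Int.mod n 10) 2 = 0 then
      evensLoop (PySem.Int.floordiv n 10) (newNum + (PySem.Int.mod n 10) * powers) (powers * 10)
    else
      evensLoop (PySem.Int.floordiv n 10) newNum powers
  else newNum
termination_by n.toNat
decreasing_by
  all_goals
    have h : PySem.Int.floordiv n 10 = n / 10 :=
      PySem.Int.floordiv_eq_ediv_of_pos (by omega)
    simp only [h]; omega

def fun_recursion_onlyevendigits_alt (l : List Int) (finl : Option (List Int)) (count : Int) : List Int :=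
  let f := finl.getD []
  if l = [] ∧ count = 0 then l
  else f ++ l.map (fun n => evensLoop n 0 1)

-- ===== PRECONDITION & SPEC =====
-- On calls with nonempty l and count = -len(l), A's incremented counter reaches 0 exactly when the
-- list is exhausted, so its guard for empty input re-fires and A discards everything and returns an empty list;
-- B returns finl plus the processed numbers, which is the intended value.
def D_fun_recursion_onlyevendigits (l : List Int) (finl : Option (List Int)) (count : Int) : Prop :=
  l ≠ [] ∧ count + l.length = 0
instance (l : List Int) (finl : Option (List Int)) (count : Int) : Decidable (D_fun_recursion_onlyevendigits l finl count) := by unfold D_fun_recursion_onlyevendigits; infer_instance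
def Spec_fun_recursion_onlyevendigits (l : List Int) (finl : Option (List Int)) (count : Int) (out : List Int) : Prop := ¬ D_fun_recursion_onlyevendigits l finl count → out = fun_recursion_onlyevendigits_alt l finl count
instance (l : List Int) (finl : Option (List Int)) (count : Int) (out : List Int) : Decidable (Spec_fun_recursion_onlyevendigits l finl count out) := by unfold Spec_fun_recursion_onlyevendigits; infer_instance
def pvDiffWitness_fun_recursion_onlyevendigits : List Int × Option (List Int) × Int := ([2], none, -1)
def pvDiffWitnessOut_fun_recursion_onlyevendigits : (List Int) × (List Int) := ([], [2])

-- ===== CLAIM (what is proved, stated in full; the proofs are below) =====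
def Claim_unchanged_fun_recursion_onlyevendigits : Prop := ∀ (l : List Int) (finl : Option (List Int)) (count : Int), Dom_fun_recursion_onlyevendigits l finl count → Spec_fun_recursion_onlyevendigits l finl count (fun_recursion_onlyevendigits l finl count)
def Claim_changed_fun_recursion_onlyevendigits : Prop := Dom_fun_recursion_onlyevendigits (pvDiffWitness_fun_recursion_onlyevendigits.1) (pvDiffWitness_fun_recursion_onlyevendigits.2.1) (pvDiffWitness_fun_recursion_onlyevendigits.2.2) ∧ D_fun_recursion_onlyevendigits (pvDiffWitness_fun_recursion_onlyevendigits.1) (pvDiffWitness_fun_recursion_onlyevendigits.2.1) (pvDiffWitness_fun_recursion_onlyevendigits.2.2) ∧ fun_recursion_onlyevendigits (pvDiffWitness_fun_recursion_onlyevendigits.1) (pvDiffWitness_fun_recursion_onlyevendigits.2.1) (pvDiffWitness_fun_recursion_onlyevendigits.2.2) = pvDiffWitnessOut_fun_recursion_onlyevendigits.1 ∧ fun_recursion_onlyevendigits_alt (pvDiffWitness_fun_recursion_onlyevendigits.1) (pvDiffWitness_fun_recursion_onlyevendigits.2.1) (pvDiffWitness_fun_recursion_onlyevendigits.2.2) =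 pvDiffWitnessOut_fun_recursion_onlyevendigits.2 ∧ pvDiffWitnessOut_fun_recursion_onlyevendigits.1 ≠ pvDiffWitnessOut_fun_recursion_onlyevendigits.2
def Claim_exact_fun_recursion_onlyevendigits : Prop := ∀ (l : List Int) (finl : Option (List Int)) (count : Int), Dom_fun_recursion_onlyevendigits l finl count → D_fun_recursion_onlyevendigits l finl count → fun_recursion_onlyevendigits l finl count ≠ fun_recursion_onlyevendigits_alt l finl count

-- ===== LEMMAS AND PROOFS =====
theorem checkForEvens_eq_evensLoop (n a p : Int) : checkForEvens n a p = evensLoop n a p := by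
  by_cases h : n ≤ 0
  · rw [checkForEvens, evensLoop, if_pos h, if_neg (by omega)]
  · rw [checkForEvens, evensLoop, if_neg h, if_pos (show 0 < n by omega)]
    split_ifs with hd
    · exact checkForEvens_eq_evensLoop _ _ _
    · exact checkForEvens_eq_evensLoop _ _ _
termination_by n.toNat
decreasing_by
  all_goals
    have heq : PySem.Int.floordiv n 10 = n / 10 :=
      PySem.Int.floordiv_eq_ediv_of_pos (by omega)
    simp only [heq]; omega

theorem funAux_eq (l : List Int) : ∀ (f : List Int) (c : Int), c + l.length ≠ 0 →
    funAux l f c = f ++ l.map (fun n => evensLoop n 0 1) := by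
  induction l with
  | nil =>
    intro f c hc
    rw [funAux]
    simp at hc
    simp [hc]
  | cons x rest ih =>
    intro f c hc
    rw [funAux, if_neg (by simp)]
    rw [ih (f ++ [checkForEvens x 0 1]) (c + 1) (by simp at hc ⊢; omega)]
    simp [checkForEvens_eq_evensLoop]

theorem funAux_drop (l : List Int) : ∀ (f : List Int) (c : Int), l ≠ [] → c + l.length = 0 →
    funAux l f c = [] := by
  induction l with
  | nil => intro _ _ h; exact absurd rfl h
  | cons x rest ih =>
    intro f c _ hc
    rw [funAux]
    simp only [show ¬((x :: rest : List Int) = [] ∧ c = 0) by simp_all, if_neg, not_false_iff]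
    cases hr : rest with
    | nil =>
      subst hr
      rw [funAux]
      simp at hc
      simp [show c + 1 = 0 by omega]
    | cons y t =>
      rw [← hr]
      exact ih _ (c + 1) (by simp [hr]) (by simp at hc ⊢; omega)

-- ===== VERDICT (by name: the statement is the Claim_ definition above) =====
theorem fun_recursion_onlyevendigits_spec : Claim_unchanged_fun_recursion_onlyevendigits := by
  intro l finl count _ hD
  unfold fun_recursion_onlyevendigits fun_recursion_onlyevendigits_alt
  by_cases h0 : l = [] ∧ count = 0
  · obtain ⟨hl, hc⟩ := h0; subst hl hc
    rw [funAux]; simp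
  · simp only [h0, if_neg, not_false_iff]
    apply funAux_eq
    unfold D_fun_recursion_onlyevendigits at hD
    intro hsum
    rcases Decidable.em (l = []) with hl | hl
    · subst hl; simp at hsum; exact h0 ⟨rfl, hsum⟩
    · exact hD ⟨hl, hsum⟩

theorem evensLoop_two : evensLoop 2 0 1 = 2 := by
  rw [evensLoop]
  norm_num [show PySem.Int.mod 2 10 = 2 from by decide, show PySem.Int.mod 2 2 = 0 from by decide,
    show PySem.Int.floordiv 2 10 = 0 from by decide]
  rw [evensLoop]; norm_num

theorem fun_recursion_onlyevendigits_changed : Claim_changed_fun_recursion_onlyevendigits := by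
  unfold Claim_changed_fun_recursion_onlyevendigits
  refine ⟨by decide, by decide, ?_, ?_, by decide⟩
  · show fun_recursion_onlyevendigits [2] none (-1) = []
    unfold fun_recursion_onlyevendigits
    exact funAux_drop [2] [] (-1) (by simp) (by simp)
  · show fun_recursion_onlyevendigits_alt [2] none (-1) = [2]
    unfold fun_recursion_onlyevendigits_alt
    norm_num [evensLoop_two]

theorem fun_recursion_onlyevendigits_tight : Claim_exact_fun_recursion_onlyevendigits := by
  intro l finl count _ hD
  obtain ⟨hl, hc⟩ := hD
  unfold fun_recursion_onlyevendigits fun_recursion_onlyevendigits_alt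
  rw [funAux_drop l _ count hl hc]
  have hc0 : count ≠ 0 := by cases l with | nil => exact absurd rfl hl | cons a t => simp at hc ⊢; omega
  simp only [show ¬(l = [] ∧ count = 0) by tauto, if_neg, not_false_iff]
  intro h
  cases l with
  | nil => exact hl rfl
  | cons a t => simp at h
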